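-- pv_equiv track=rewrite | github.com/triposat/Daily_Challenges | Swap bits - GFG/swap-bits.py | swapBits
-- ===== SOURCE A (Python) =====
-- def swapBits(X, P1, P2, N):
--         for i in range(0,N):
--             temp1 = (1<<(P1+i))
--             temp2 = (1<<(P2+i))
--             if temp1 & X == temp2 & X  or (temp1 & X == temp1 and temp2 & X == temp2):
--                 continue
--             else:
--                 X ^= temp2
--                 X ^= temp1
--         return X
-- ===== SOURCE B (Python) =====
-- def swapBits(X, P1, P2, N):
--     # Constant-time field swap: XOR the two N-bit fields' difference into both positions.
--     if N <= 0:
--         return X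
--     diff = ((X >> P1) ^ (X >> P2)) & ((1 << N) - 1)
--     return X ^ (diff << P1) ^ (diff << P2)
-- ===== Notes on version B (the rewrite author's own statement) =====
-- stated objective: faster
-- what changed: Replaces A's O(N) loop that tests and swaps one bit pair per iteration with a constant-operation field swap: extract the XOR difference of the two N-bit fields, mask it, and XOR it back in at both positions.
-- outside the precondition, e.g. on swapBits(1, 0, 1, 2): A returns 4, B returns 2
import Mathlib
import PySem

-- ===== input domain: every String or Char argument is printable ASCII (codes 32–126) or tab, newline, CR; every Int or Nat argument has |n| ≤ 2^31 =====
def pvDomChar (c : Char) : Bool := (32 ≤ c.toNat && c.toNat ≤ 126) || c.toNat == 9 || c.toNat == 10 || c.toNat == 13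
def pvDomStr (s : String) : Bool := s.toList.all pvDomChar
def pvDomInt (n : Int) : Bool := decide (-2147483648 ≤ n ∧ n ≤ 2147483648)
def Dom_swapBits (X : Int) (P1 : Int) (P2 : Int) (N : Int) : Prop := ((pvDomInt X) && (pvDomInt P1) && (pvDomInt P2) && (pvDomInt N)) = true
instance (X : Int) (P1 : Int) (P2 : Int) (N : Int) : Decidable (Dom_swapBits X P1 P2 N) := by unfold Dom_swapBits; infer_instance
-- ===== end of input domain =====

-- B swaps the two N-bit fields in constant ops (XOR of the masked field difference into both
-- positions) instead of A's bit-by-bit loop; equal on all inputs admitted by Pre_.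

-- ===== PORT A =====
-- one iteration of A's loop body ('1 << (P1+i)': Python raises on a negative shift; Pre_ excludes that)
def swapBitsStep (P1 : Int) (P2 : Int) (X : Int) (i : Int) : Int :=
  let temp1 : Int := 1 <<< (P1 + i).toNat
  let temp2 : Int := 1 <<< (P2 + i).toNat
  if PySem.Int.band temp1 X = PySem.Int.band temp2 X ∨
     (PySem.Int.band temp1 X = temp1 ∧ PySem.Int.band temp2 X = temp2) then X
  else PySem.Int.bxor (PySem.Int.bxor X temp2) temp1

def swapBits (X : Int) (P1 : Int) (P2 : Int) (N : Int) : Int :=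
  (PySem.List.pyRange 0 N).foldl (swapBitsStep P1 P2) X

-- ===== PORT B =====
def swapBits_alt (X : Int) (P1 : Int) (P2 : Int) (N : Int) : Int :=
  if N ≤ 0 then X
  else
    let diff := PySem.Int.band (PySem.Int.bxor (X >>> P1.toNat) (X >>> P2.toNat)) ((1 <<< N.toNat) - 1)
    PySem.Int.bxor (PySem.Int.bxor X (diff <<< P1.toNat)) (diff <<< P2.toNat)

-- ===== PRECONDITION & SPEC =====
-- Pre_ excludes (a) N > 0 with a negative position, where Python A raises ValueError on '1 << negative',
-- and (b) N > 0 with overlapping bit ranges 0 < |P1 - P2| < N, where A still returns a value but that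
-- value is an accident of its sequential one-bit swap order (swapping overlapping fields is a corner no
-- one would specify); B does the natural parallel field swap there.
def Pre_swapBits (X : Int) (P1 : Int) (P2 : Int) (N : Int) : Prop :=
  0 < N → (0 ≤ P1 ∧ 0 ≤ P2 ∧ (P1 = P2 ∨ P1 + N ≤ P2 ∨ P2 + N ≤ P1))
instance (X : Int) (P1 : Int) (P2 : Int) (N : Int) : Decidable (Pre_swapBits X P1 P2 N) := by unfold Pre_swapBits; infer_instance

def pvWitness_swapBits : Int × Int × Int × Int := (5, 1, 4, 3)

def Spec_swapBits (X : Int) (P1 : Int) (P2 : Int) (N : Int) (out : Int) : Prop := out = swapBits_alt X P1 P2 N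
instance (X : Int) (P1 : Int) (P2 : Int) (N : Int) (out : Int) : Decidable (Spec_swapBits X P1 P2 N out) := by unfold Spec_swapBits; infer_instance

-- ===== CLAIM (what is proved, stated in full; the proofs are below) =====
def Claim_equal_swapBits : Prop := ∀ (X : Int) (P1 : Int) (P2 : Int) (N : Int), Dom_swapBits X P1 P2 N → Pre_swapBits X P1 P2 N → Spec_swapBits X P1 P2 N (swapBits X P1 P2 N)

-- ===== LEMMAS AND PROOFS =====

def pvBit (t : Int) (p : Nat) : Bool := if 0 ≤ t then t.toNat.testBit p else !((-t-1).toNat.testBit p)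

theorem pvBit_neg (m : Nat) (p : Nat) : pvBit (-(m : Int) - 1) p = !(m.testBit p) := by
  have h : ¬ (0 ≤ -(m:Int) - 1) := by omega
  simp only [pvBit, if_neg h, show (-(-(m:Int)-1)-1) = (m:Int) by ring, Int.toNat_natCast]

theorem bxor_nn (m k : Nat) : PySem.Int.bxor (-(m:Int)-1) (k:Int) = -((m ^^^ k : Nat) : Int) - 1 := by
  have h : ¬ (0 ≤ -(m:Int) - 1) := by omega
  simp only [PySem.Int.bxor, if_neg h, if_pos (Int.natCast_nonneg k),
    show (-(-(m:Int)-1)-1) = (m:Int) by ring, Int.toNat_natCast]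

theorem bxor_nn' (m k : Nat) : PySem.Int.bxor (m:Int) (-(k:Int)-1) = -((m ^^^ k : Nat) : Int) - 1 := by
  have h : ¬ (0 ≤ -(k:Int) - 1) := by omega
  simp only [PySem.Int.bxor, if_pos (Int.natCast_nonneg m), if_neg h,
    show (-(-(k:Int)-1)-1) = (k:Int) by ring, Int.toNat_natCast]

theorem bxor_nnn (m k : Nat) : PySem.Int.bxor (-(m:Int)-1) (-(k:Int)-1) = ((m ^^^ k : Nat) : Int) := by
  have h : ¬ (0 ≤ -(m:Int) - 1) := by omega
  have h' : ¬ (0 ≤ -(k:Int) - 1) := by omega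
  simp only [PySem.Int.bxor, if_neg h, if_neg h', show (-(-(m:Int)-1)-1) = (m:Int) by ring,
    show (-(-(k:Int)-1)-1) = (k:Int) by ring, Int.toNat_natCast]

theorem pv_cases (t : Int) : ∃ m : Nat, t = (m : Int) ∨ t = -(m : Int) - 1 := by
  rcases le_or_gt 0 t with h | h
  · exact ⟨t.toNat, Or.inl (by omega)⟩
  · exact ⟨(-t-1).toNat, Or.inr (by omega)⟩

theorem pvBit_natCast (m : Nat) (p : Nat) : pvBit (m : Int) p = m.testBit p := by
  simp [pvBit]

theorem pvBit_bxor (s t : Int) (p : Nat) :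
    pvBit (PySem.Int.bxor s t) p = (pvBit s p ^^ pvBit t p) := by
  obtain ⟨m, hm | hm⟩ := pv_cases s <;> obtain ⟨k, hk | hk⟩ := pv_cases t <;> subst hm hk <;>
    simp only [PySem.Int.bxor_natCast, bxor_nn, bxor_nn', bxor_nnn, pvBit_neg, pvBit_natCast,
      Nat.testBit_xor] <;>
    cases hm : m.testBit p <;> cases hk : k.testBit p <;> simp

theorem bxor_assoc_int (s t u : Int) :
    PySem.Int.bxor (PySem.Int.bxor s t) u = PySem.Int.bxor s (PySem.Int.bxor t u) := by
  obtain ⟨m, hm | hm⟩ := pv_cases s <;> obtain ⟨k, hk | hk⟩ := pv_cases t <;>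
    obtain ⟨l, hl | hl⟩ := pv_cases u <;> subst hm hk hl <;>
    simp [PySem.Int.bxor_natCast, bxor_nn, bxor_nn', bxor_nnn, Nat.xor_assoc]

theorem bxor_left_comm_int (s t u : Int) :
    PySem.Int.bxor s (PySem.Int.bxor t u) = PySem.Int.bxor t (PySem.Int.bxor s u) := by
  rw [← bxor_assoc_int, PySem.Int.bxor_comm s t, bxor_assoc_int]

theorem add_pow_xor (u q : Nat) (h : u < 2^q) : u + 2^q = u ^^^ 2^q := by
  apply Nat.eq_of_testBit_eq
  intro i
  rw [Nat.testBit_xor, Nat.testBit_two_pow]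
  rcases lt_trichotomy i q with hi | rfl | hi
  · have hqi : q = i + (q - i) := by omega
    have hpos : 0 < q - i := by omega
    rw [Nat.testBit_eq_decide_div_mod_eq, Nat.testBit_eq_decide_div_mod_eq]
    have hdiv : (u + 2^q) / 2^i = u / 2^i + 2^(q-i) := by
      rw [hqi, pow_add, Nat.add_mul_div_left _ _ (Nat.two_pow_pos i)]
      simp
    have heven : 2^(q-i) % 2 = 0 := by
      have h2 : 2^(q-i) = 2 * 2^(q-i-1) := by
        rw [← pow_succ']
        congr 1
        omega
      omega
    rw [hdiv]
    have hmod : (u / 2^i + 2^(q-i)) % 2 = u / 2^i % 2 := by omega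
    rw [hmod]
    simp [show ¬ (q = i) by omega]
  · have h1 : u.testBit i = false := Nat.testBit_lt_two_pow h
    have h2 : (u + 2^i) / 2^i = 1 := by
      rw [Nat.add_div_right _ (Nat.two_pow_pos i)]
      rw [Nat.div_eq_of_lt h]
    rw [Nat.testBit_eq_decide_div_mod_eq, h2, h1]
    simp
  · have h1 : u.testBit i = false := Nat.testBit_lt_two_pow (lt_trans h (Nat.pow_lt_pow_right (by norm_num) hi))
    have h2 : (u + 2^q).testBit i = false := by
      apply Nat.testBit_lt_two_pow
      calc u + 2^q < 2^q + 2^q := by omega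
        _ = 2^(q+1) := by ring
        _ ≤ 2^i := Nat.pow_le_pow_right (by norm_num) (by omega)
    rw [h1, h2]
    simp [show ¬ (q = i) by omega]

theorem bxor_split (X : Int) (u q : Nat) (h : u < 2^q) :
    PySem.Int.bxor X ((u : Int) + ((2^q : Nat) : Int)) =
      PySem.Int.bxor (PySem.Int.bxor X (u : Int)) ((2^q : Nat) : Int) := by
  have hc : ((u : Int) + ((2^q : Nat) : Int)) = (((u ^^^ 2^q : Nat)) : Int) := by
    rw [← add_pow_xor u q h]
    push_cast
    ring
  rw [hc]
  obtain ⟨m, hm | hm⟩ := pv_cases X <;> subst hm <;>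
    simp only [PySem.Int.bxor_natCast, bxor_nn, Nat.xor_assoc]

theorem band_pow (q : Nat) (X : Int) :
    PySem.Int.band ((2^q : Nat) : Int) X = if pvBit X q then ((2^q : Nat) : Int) else 0 := by
  obtain ⟨m, hm | hm⟩ := pv_cases X <;> subst hm
  · rw [PySem.Int.band_natCast, pvBit_natCast, Nat.two_pow_and]
    cases h : m.testBit q <;> simp
  · have h : ¬ (0 ≤ -(m:Int) - 1) := by omega
    rw [pvBit_neg]
    simp only [PySem.Int.band, if_pos (Int.natCast_nonneg (2^q)), if_neg h,
      show (-(-(m:Int)-1)-1) = (m:Int) by ring, Int.toNat_natCast]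
    rw [Nat.two_pow_and]
    cases hb : m.testBit q <;> simp

theorem band_mask_bounds (e : Int) (k : Nat) :
    0 ≤ PySem.Int.band e ((2^k - 1 : Nat) : Int) ∧
      PySem.Int.band e ((2^k - 1 : Nat) : Int) < ((2^k : Nat) : Int) := by
  obtain ⟨m, hm | hm⟩ := pv_cases e <;> subst hm
  · rw [PySem.Int.band_natCast, Nat.and_two_pow_sub_one_eq_mod]
    have := Nat.mod_lt m (Nat.two_pow_pos k)
    constructor <;> [positivity; exact_mod_cast this]
  · have h : ¬ (0 ≤ -(m:Int) - 1) := by omega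
    simp only [PySem.Int.band, if_neg h, if_pos (Int.natCast_nonneg (2^k-1)),
      show (-(-(m:Int)-1)-1) = (m:Int) by ring, Int.toNat_natCast]
    rw [show (2^k-1) &&& m = m % 2^k from by rw [Nat.and_comm, Nat.and_two_pow_sub_one_eq_mod]]
    have h1 : 0 < 2^k := Nat.two_pow_pos k
    have h2 : m % 2^k < 2^k := Nat.mod_lt m h1
    refine ⟨by positivity, ?_⟩
    have h3 : (2:Nat)^k - 1 - m % 2^k < 2^k := by omega
    exact_mod_cast h3

theorem band_mask_rec (e : Int) (k : Nat) :
    PySem.Int.band e ((2^(k+1) - 1 : Nat) : Int) =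
      PySem.Int.band e ((2^k - 1 : Nat) : Int) + (if pvBit e k then ((2^k : Nat) : Int) else 0) := by
  obtain ⟨m, hm | hm⟩ := pv_cases e <;> subst hm
  · rw [PySem.Int.band_natCast, PySem.Int.band_natCast, pvBit_natCast,
      Nat.and_two_pow_sub_one_eq_mod, Nat.and_two_pow_sub_one_eq_mod,
      Nat.testBit_eq_decide_div_mod_eq, Nat.mod_pow_succ]
    have hb : m / 2^k % 2 = 0 ∨ m / 2^k % 2 = 1 := by omega
    rcases hb with hb | hb <;> rw [hb] <;> norm_num
  · have h : ¬ (0 ≤ -(m:Int) - 1) := by omega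
    rw [pvBit_neg]
    simp only [PySem.Int.band, if_neg h, if_pos (Int.natCast_nonneg (2^(k+1)-1)),
      if_pos (Int.natCast_nonneg (2^k-1)),
      show (-(-(m:Int)-1)-1) = (m:Int) by ring, Int.toNat_natCast]
    rw [show (2^(k+1)-1) &&& m = m % 2^(k+1) from by rw [Nat.and_comm, Nat.and_two_pow_sub_one_eq_mod],
      show (2^k-1) &&& m = m % 2^k from by rw [Nat.and_comm, Nat.and_two_pow_sub_one_eq_mod],
      Nat.testBit_eq_decide_div_mod_eq, Nat.mod_pow_succ]
    have h1 : 0 < 2^k := Nat.two_pow_pos k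
    have h2 : m % 2^k < 2^k := Nat.mod_lt m h1
    have h3 : 2^(k+1) = 2^k * 2 := by ring
    have h4 : (2:Nat)^(k+1) = 2 * 2^k := by ring
    have e1 : ((2^k : Nat) : Int) = (2:Int)^k := by push_cast; ring
    have hb : m / 2^k % 2 = 0 ∨ m / 2^k % 2 = 1 := by omega
    rcases hb with hb | hb <;> rw [hb] <;> norm_num <;> (try simp only [← e1]) <;> omega

theorem pvBit_shiftRight (X : Int) (k p : Nat) : pvBit (X >>> k) p = pvBit X (k + p) := by
  obtain ⟨m, hm | hm⟩ := pv_cases X <;> subst hm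
  · rw [← Int.natCast_shiftRight, pvBit_natCast, pvBit_natCast, Nat.testBit_shiftRight]
  · rw [show -(m:Int) - 1 = Int.negSucc m by simp [Int.negSucc_eq]; ring,
      Int.negSucc_shiftRight,
      show Int.negSucc (m >>> k) = -((m >>> k : Nat) : Int) - 1 by simp [Int.negSucc_eq]; ring,
      pvBit_neg, show Int.negSucc m = -(m:Int) - 1 by simp [Int.negSucc_eq]; ring,
      pvBit_neg, Nat.testBit_shiftRight]

theorem shiftLeft_nonneg (d : Int) (hd : 0 ≤ d) (a : Nat) : d <<< a = ((d.toNat <<< a : Nat) : Int) := by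
  lift d to Nat using hd
  rw [Int.natCast_shiftLeft]
  simp

def pvD (X : Int) (a b k : Nat) : Int :=
  PySem.Int.band (PySem.Int.bxor (X >>> a) (X >>> b)) ((2^k - 1 : Nat) : Int)

def pvB (X : Int) (a b : Nat) (d : Int) : Int :=
  PySem.Int.bxor (PySem.Int.bxor X (d <<< a)) (d <<< b)

theorem pvBit_pvB_outside (X : Int) (a b : Nat) (d : Int) (hd0 : 0 ≤ d) (k : Nat)
    (hdlt : d < ((2^k : Nat) : Int)) (p : Nat)
    (hpa : p < a ∨ a + k ≤ p) (hpb : p < b ∨ b + k ≤ p) :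
    pvBit (pvB X a b d) p = pvBit X p := by
  have hnat : d.toNat < 2^k := by omega
  have ha : pvBit (d <<< a) p = false := by
    rw [shiftLeft_nonneg d hd0, pvBit_natCast, Nat.testBit_shiftLeft]
    rcases hpa with h | h
    · simp [show ¬ (p ≥ a) by omega]
    · have : d.toNat < 2^(p - a) :=
        lt_of_lt_of_le hnat (Nat.pow_le_pow_right (by norm_num) (by omega))
      simp [Nat.testBit_lt_two_pow this]
  have hb : pvBit (d <<< b) p = false := by
    rw [shiftLeft_nonneg d hd0, pvBit_natCast, Nat.testBit_shiftLeft]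
    rcases hpb with h | h
    · simp [show ¬ (p ≥ b) by omega]
    · have : d.toNat < 2^(p - b) :=
        lt_of_lt_of_le hnat (Nat.pow_le_pow_right (by norm_num) (by omega))
      simp [Nat.testBit_lt_two_pow this]
  rw [pvB, pvBit_bxor, pvBit_bxor, ha, hb]
  simp

theorem shift_decomp (d : Int) (hd0 : 0 ≤ d) (k : Nat) (hdlt : d < ((2^k : Nat) : Int)) (a : Nat) :
    (d + ((2^k : Nat) : Int)) <<< a = ((d.toNat <<< a : Nat) : Int) + ((2^(a+k) : Nat) : Int) := by
  have h0 : (0:Int) ≤ d + ((2^k : Nat) : Int) := by positivity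
  rw [shiftLeft_nonneg _ h0]
  have h1 : (d + ((2^k : Nat) : Int)).toNat = d.toNat + 2^k := by omega
  rw [h1]
  have h2 : (d.toNat + 2^k) <<< a = d.toNat <<< a + 2^(a+k) := by
    rw [Nat.shiftLeft_eq, Nat.shiftLeft_eq, Nat.add_mul, pow_add]
    ring_nf
  rw [h2]
  push_cast
  ring

theorem main_loop (X : Int) (a b n : Nat) (hdisj : a + n ≤ b ∨ b + n ≤ a) :
    ∀ k, k ≤ n →
      (PySem.List.pyRange 0 (k : Int)).foldl (swapBitsStep (a : Int) (b : Int)) X =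
        pvB X a b (pvD X a b k) := by
  intro k
  induction k with
  | zero =>
    intro _
    have h1 : pvD X a b 0 = 0 := by
      have : ((2^0 - 1 : Nat) : Int) = 0 := by norm_num
      rw [pvD, this, PySem.Int.band_zero]
    rw [show ((0:Nat):Int) = (0:Int) from rfl, show PySem.List.pyRange 0 0 = [] from rfl,
      List.foldl_nil, h1, pvB]
    have h2 : (0:Int) <<< a = 0 := by simp
    have h3 : (0:Int) <<< b = 0 := by simp
    rw [h2, h3, PySem.Int.bxor_zero, PySem.Int.bxor_zero]
  | succ k ih =>
    intro hk1
    have hk : k ≤ n := by omega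
    have hkn : k < n := by omega
    rw [show ((k+1 : Nat) : Int) = (k : Int) + 1 by push_cast; ring,
      PySem.List.pyRange_one_succ_right (by positivity), List.foldl_append, ih hk,
      List.foldl_cons, List.foldl_nil]
    -- abbreviations
    set e : Int := PySem.Int.bxor (X >>> a) (X >>> b) with he
    set dk : Int := pvD X a b k with hdk
    set Y : Int := pvB X a b dk with hY
    obtain ⟨hd0, hdlt⟩ := band_mask_bounds e k
    have hd0 : 0 ≤ dk := hd0
    have hdlt : dk < ((2^k : Nat) : Int) := hdlt
    have hrec : pvD X a b (k+1) = dk + (if pvBit e k then ((2^k : Nat) : Int) else 0) :=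
      band_mask_rec e k
    have hc : pvBit e k = (pvBit X (a+k) ^^ pvBit X (b+k)) := by
      rw [he, pvBit_bxor, pvBit_shiftRight, pvBit_shiftRight]
    have hYa : pvBit Y (a+k) = pvBit X (a+k) := by
      rw [hY]
      apply pvBit_pvB_outside X a b dk hd0 k hdlt <;> omega
    have hYb : pvBit Y (b+k) = pvBit X (b+k) := by
      rw [hY]
      apply pvBit_pvB_outside X a b dk hd0 k hdlt <;> omega
    -- the step's two powers of two
    have ht1 : ((a:Int) + (k:Int)).toNat = a + k := by omega
    have ht2 : ((b:Int) + (k:Int)).toNat = b + k := by omega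
    have hstep : swapBitsStep (a : Int) (b : Int) Y (k : Int) =
        if pvBit Y (a+k) = pvBit Y (b+k) then Y
        else PySem.Int.bxor (PySem.Int.bxor Y ((2^(b+k) : Nat) : Int)) ((2^(a+k) : Nat) : Int) := by
      have hpa : ((2^(a+k) : Nat) : Int) ≠ 0 := by positivity
      have hpb : ((2^(b+k) : Nat) : Int) ≠ 0 := by positivity
      have hqa : ((2:Int))^(a+k) ≠ 0 := by positivity
      have hqb : ((2:Int))^(b+k) ≠ 0 := by positivity
      simp only [swapBitsStep, ht1, ht2, Nat.one_shiftLeft, band_pow]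
      rcases h1 : pvBit Y (a+k) <;> rcases h2 : pvBit Y (b+k) <;>
        simp [h2, hpa, hpb, hpa.symm, hpb.symm, hqa, hqb, hqa.symm, hqb.symm]
    have hu : (dk.toNat <<< a : Nat) < 2^(a+k) := by
      have h5 : dk.toNat < 2^k := by omega
      calc dk.toNat <<< a = dk.toNat * 2^a := Nat.shiftLeft_eq _ _
        _ < 2^k * 2^a := Nat.mul_lt_mul_of_lt_of_le h5 (le_refl _) (Nat.two_pow_pos a)
        _ = 2^(a+k) := by rw [← pow_add]; ring_nf
    have hv : (dk.toNat <<< b : Nat) < 2^(b+k) := by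
      have h5 : dk.toNat < 2^k := by omega
      calc dk.toNat <<< b = dk.toNat * 2^b := Nat.shiftLeft_eq _ _
        _ < 2^k * 2^b := Nat.mul_lt_mul_of_lt_of_le h5 (le_refl _) (Nat.two_pow_pos b)
        _ = 2^(b+k) := by rw [← pow_add]; ring_nf
    by_cases heq : pvBit X (a+k) = pvBit X (b+k)
    · have hc0 : pvBit e k = false := by rw [hc, heq, Bool.xor_self]
      rw [hstep, if_pos (by rw [hYa, hYb, heq]), hrec, hc0]
      simp [hY]
    · have hc1 : pvBit e k = true := by
        rw [hc]
        cases hxa : pvBit X (a+k) <;> cases hxb : pvBit X (b+k) <;> simp_all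
      rw [hstep, if_neg (by rw [hYa, hYb]; exact heq), hrec, hc1, if_pos rfl, hY]
      rw [pvB, pvB, shift_decomp dk hd0 k hdlt a, shift_decomp dk hd0 k hdlt b,
        shiftLeft_nonneg dk hd0 a, shiftLeft_nonneg dk hd0 b,
        bxor_split X _ (a+k) hu, bxor_split _ _ (b+k) hv]
      simp only [bxor_assoc_int, bxor_left_comm_int, PySem.Int.bxor_comm]

theorem loop_const (X : Int) (P : Int) (L : List Int) :
    L.foldl (swapBitsStep P P) X = X := by
  induction L generalizing X with
  | nil => rfl
  | cons i L ih =>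
    rw [List.foldl_cons, show swapBitsStep P P X i = X from by simp [swapBitsStep], ih]

theorem pyRange_nonpos (N : Int) (h : N ≤ 0) : PySem.List.pyRange 0 N = [] := by
  simp [PySem.List.pyRange, show ¬ ((0:Int) < N) by omega]

theorem swapBits_agree (X P1 P2 N : Int)
    (hPre : 0 < N → (0 ≤ P1 ∧ 0 ≤ P2 ∧ (P1 = P2 ∨ P1 + N ≤ P2 ∨ P2 + N ≤ P1))) :
    swapBits X P1 P2 N = swapBits_alt X P1 P2 N := by
  by_cases hN : N ≤ 0
  · rw [swapBits, pyRange_nonpos N hN, List.foldl_nil, swapBits_alt, if_pos hN]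
  · have hN0 : 0 < N := by omega
    obtain ⟨hP1, hP2, hcase⟩ := hPre hN0
    rcases hcase with hPP | hcase
    · subst hPP
      rw [swapBits, loop_const, swapBits_alt, if_neg hN]
      have he : PySem.Int.bxor (X >>> P1.toNat) (X >>> P1.toNat) = 0 := PySem.Int.bxor_self _
      rw [he, show PySem.Int.band 0 ((1 <<< N.toNat) - 1) = 0 from by
          rw [PySem.Int.band_comm, PySem.Int.band_zero]]
      simp [PySem.Int.bxor_zero]
    · set a := P1.toNat with ha
      set b := P2.toNat with hb
      set n := N.toNat with hn
      have hP1' : P1 = (a : Int) := by omega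
      have hP2' : P2 = (b : Int) := by omega
      have hN' : N = (n : Int) := by omega
      have hdisj : a + n ≤ b ∨ b + n ≤ a := by omega
      rw [swapBits_alt, if_neg hN, swapBits, hP1', hP2', hN',
        main_loop X a b n hdisj n (le_refl n)]
      simp only [Int.toNat_natCast, Nat.one_shiftLeft]
      rw [show ((2^n : Nat) : Int) - 1 = ((2^n - 1 : Nat) : Int) from by
        have := Nat.two_pow_pos n; omega]
      rfl

-- ===== VERDICT (by name: the statement is the Claim_ definition above) =====
theorem swapBits_spec : Claim_equal_swapBits := by
  intro X P1 P2 N _ hPre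
  unfold Spec_swapBits
  exact swapBits_agree X P1 P2 N hPre
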